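-- pv_equiv track=rewrite | github.com/lilianabs/Research | CodingThmLikeBehaviour/computeComplexityStrings.py | codeDiamondInv
-- ===== SOURCE A (Python) =====
-- def codeCrossInv(s):
--     if len(s) <= 1:
--         return ""
--     if s[len(s) - 1] == "1" and len(s) % 2 == 0:
--         str_to_list = list(s)
--         new_str = [str_to_list[i] for i in range(0, len(str_to_list) - 2, 2)]
--         new_str.append(str_to_list[len(str_to_list) - 2])
--         return "".join(new_str)
--     return ""
--
-- def codeDiamondInv(s):
--     new_str = list(s)
--     for i in range(0, len(new_str)):
--         if new_str[i] == "0":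
--             new_str[i] = "1"
--         else:
--             new_str[i] = "0"
--     return codeCrossInv("".join(new_str))[1:]
-- ===== SOURCE B (Python) =====
-- def codeDiamondInv(s):
--     n = len(s)
--     if n < 2 or n % 2 == 1 or s[n - 1] != "0":
--         return ""
--     return "".join("1" if s[i] == "0" else "0" for i in range(2, n, 2))
-- ===== Notes on version B (the rewrite author's own statement) =====
-- stated objective: simpler
-- what changed: B replaces A's flip-whole-string pass, the codeCrossInv helper's comprehension-plus-append sampling and the final [1:] slice by a single guarded comprehension that directly emits the flipped characters at even indices 2..n-2 of the original string (one pass over half the characters, no intermediate lists).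
import Mathlib
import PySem

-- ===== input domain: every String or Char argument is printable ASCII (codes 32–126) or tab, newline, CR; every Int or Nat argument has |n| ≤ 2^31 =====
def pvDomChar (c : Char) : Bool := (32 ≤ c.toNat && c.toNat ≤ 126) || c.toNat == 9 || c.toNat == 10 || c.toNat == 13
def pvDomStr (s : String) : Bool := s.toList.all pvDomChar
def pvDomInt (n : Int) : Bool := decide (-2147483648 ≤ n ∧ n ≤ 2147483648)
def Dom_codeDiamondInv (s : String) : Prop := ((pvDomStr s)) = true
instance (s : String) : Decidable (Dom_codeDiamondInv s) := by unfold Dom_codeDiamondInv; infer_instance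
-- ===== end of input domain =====

-- B fuses A's flip pass, codeCrossInv's subsampling and the [1:] slice into one guarded
-- comprehension over the even indices 2..n-2 of the original string (objective: simpler).

-- ===== PORT A =====
-- A's for-loop flips each character in place, in order: the obvious structural recursion.
def pvFlip : List Char → List Char
  | [] => []
  | c :: r => (if c = '0' then '1' else '0') :: pvFlip r

-- helper codeCrossInv of A; all pyGetD indices are provably in range, so the default is never used
def codeCrossInv (s : String) : String :=
  let l := s.toList
  if l.length ≤ 1 then ""
  else if PySem.List.pyGetD l ((l.length : Int) - 1) '?' = '1' ∧ l.length % 2 = 0 then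
    let new1 := (PySem.List.pyRange 0 ((l.length : Int) - 2) 2).map
      (fun i => PySem.List.pyGetD l i '?')
    let new2 := new1 ++ [PySem.List.pyGetD l ((l.length : Int) - 2) '?']
    String.ofList new2
  else ""

def codeDiamondInv (s : String) : String :=
  String.ofList (PySem.List.slice (codeCrossInv (String.ofList (pvFlip s.toList))).toList (some 1) none)

-- ===== PORT B =====
def codeDiamondInv_alt (s : String) : String :=
  let l := s.toList
  let n := l.length
  if n < 2 ∨ n % 2 = 1 ∨ ¬ (PySem.List.pyGetD l ((n : Int) - 1) '?' = '0') then ""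
  else
    String.ofList ((PySem.List.pyRange 2 (n : Int) 2).map
      (fun i => if PySem.List.pyGetD l i '?' = '0' then '1' else '0'))

-- ===== PRECONDITION & SPEC =====
def Spec_codeDiamondInv (s : String) (out : String) : Prop := out = codeDiamondInv_alt s
instance (s : String) (out : String) : Decidable (Spec_codeDiamondInv s out) := by unfold Spec_codeDiamondInv; infer_instance

-- ===== CLAIM (what is proved, stated in full; the proofs are below) =====
def Claim_equal_codeDiamondInv : Prop := ∀ (s : String), Dom_codeDiamondInv s → Spec_codeDiamondInv s (codeDiamondInv s)

-- ===== LEMMAS AND PROOFS =====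

theorem pvFlip_eq_map (l : List Char) :
    pvFlip l = l.map (fun c => if c = '0' then '1' else '0') := by
  induction l with
  | nil => rfl
  | cons c r ih => simp [pvFlip, ih]

theorem length_pvFlip (l : List Char) : (pvFlip l).length = l.length := by
  simp [pvFlip_eq_map]

-- the index-list identity behind the fusion: dropping the head of range(0,n-2,2)+[n-2] gives range(2,n,2)
theorem tail_index_lists (m : Nat) :
    (PySem.List.pyRange 0 (2 * (m : Int)) 2 ++ [2 * (m : Int)]).tail
      = PySem.List.pyRange 2 (2 * (m : Int) + 2) 2 := by
  rw [PySem.List.pyRange_of_pos _ _ (by norm_num), PySem.List.pyRange_of_pos _ _ (by norm_num)]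
  cases m with
  | zero => simp
  | succ m' =>
    have h1 : (0 : Int) < 2 * (↑(m' + 1) : Int) := by push_cast; omega
    have h2 : (2 : Int) < 2 * (↑(m' + 1) : Int) + 2 := by push_cast; omega
    rw [if_pos h1, if_pos h2]
    have hc : ((2 * ((m' : Int) + 1) - 0 + 2 - 1) / 2).toNat = m' + 1 := by omega
    have hc2 : ((2 * ((m' : Int) + 1) + 2 - 2 + 2 - 1) / 2).toNat = m' + 1 := by omega
    push_cast
    rw [hc, hc2]
    conv_lhs => rw [List.range_succ_eq_map]
    conv_rhs => rw [List.range_succ]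
    simp only [List.map_cons, List.map_map, List.cons_append, List.tail_cons, List.map_append,
      List.map_cons, List.map_nil, Function.comp_def]
    congr 1
    · apply List.map_congr_left; intro x _; push_cast; ring
    · congr 1; ring

theorem pyGetD_pvFlip (l : List Char) (i : Int) (h0 : 0 ≤ i) (h1 : i < (l.length : Int)) :
    PySem.List.pyGetD (pvFlip l) i '?' = (if PySem.List.pyGetD l i '?' = '0' then '1' else '0') := by
  rw [PySem.List.pyGetD_eq_getElem (pvFlip l) '?' h0 (by rw [length_pvFlip]; exact h1),
      PySem.List.pyGetD_eq_getElem l '?' h0 h1]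
  simp [pvFlip_eq_map]

theorem codeDiamondInv_eq (s : String) : codeDiamondInv s = codeDiamondInv_alt s := by
  unfold codeDiamondInv codeDiamondInv_alt codeCrossInv
  simp only [String.toList_ofList, length_pvFlip]
  set l := s.toList with hl
  by_cases h1 : l.length ≤ 1
  · rw [if_pos h1, if_pos (by left; omega)]
    simp [PySem.List.slice]
  · rw [if_neg h1]
    by_cases hpar : l.length % 2 = 0
    · by_cases hlast : PySem.List.pyGetD l ((l.length : Int) - 1) '?' = '0'
      · -- interesting case: even length ≥ 2, last char '0'
        have hflast : PySem.List.pyGetD (pvFlip l) ((l.length : Int) - 1) '?' = '1' := by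
          rw [pyGetD_pvFlip l _ (by omega) (by omega), if_pos hlast]
        rw [if_pos ⟨hflast, hpar⟩, if_neg (by push Not; exact ⟨by omega, by omega, hlast⟩)]
        simp only [String.toList_ofList, PySem.List.slice_from_one]
        congr 1
        obtain ⟨m, hm⟩ : ∃ m, l.length = 2 * m + 2 := ⟨(l.length - 2) / 2, by omega⟩
        have hg : ∀ i ∈ PySem.List.pyRange 0 ((l.length : Int) - 2) 2 ++ [(l.length : Int) - 2],
            PySem.List.pyGetD (pvFlip l) i '?'
              = (if PySem.List.pyGetD l i '?' = '0' then '1' else '0') := by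
          intro i hi
          have hrange : 0 ≤ i ∧ i < (l.length : Int) := by
            rcases List.mem_append.1 hi with hi | hi
            · have := (PySem.List.mem_pyRange_iff_of_pos (by norm_num : (0:Int) < 2) i).1 hi
              omega
            · simp at hi; omega
          exact pyGetD_pvFlip l i hrange.1 hrange.2
        calc ((PySem.List.pyRange 0 ((l.length : Int) - 2) 2).map
                (fun i => PySem.List.pyGetD (pvFlip l) i '?')
              ++ [PySem.List.pyGetD (pvFlip l) ((l.length : Int) - 2) '?']).tail
            = ((PySem.List.pyRange 0 ((l.length : Int) - 2) 2 ++ [(l.length : Int) - 2]).map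
                (fun i => PySem.List.pyGetD (pvFlip l) i '?')).tail := by simp
          _ = ((PySem.List.pyRange 0 ((l.length : Int) - 2) 2 ++ [(l.length : Int) - 2]).map
                (fun i => if PySem.List.pyGetD l i '?' = '0' then '1' else '0')).tail := by
                rw [List.map_congr_left hg]
          _ = ((PySem.List.pyRange 0 ((l.length : Int) - 2) 2 ++ [(l.length : Int) - 2]).tail).map
                (fun i => if PySem.List.pyGetD l i '?' = '0' then '1' else '0') := by
                rw [List.map_tail]
          _ = (PySem.List.pyRange 2 (l.length : Int) 2).map
                (fun i => if PySem.List.pyGetD l i '?' = '0' then '1' else '0') := by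
                have e : ((l.length : Int) - 2) = 2 * (m : Int) := by omega
                have e2 : (l.length : Int) = 2 * (m : Int) + 2 := by omega
                rw [e, e2, tail_index_lists]
      · -- last char of the original is not '0', so the flipped last char is not '1'
        have hflast : ¬ (PySem.List.pyGetD (pvFlip l) ((l.length : Int) - 1) '?' = '1') := by
          rw [pyGetD_pvFlip l _ (by omega) (by omega)]
          split
          · next h0 => exact absurd h0 hlast
          · decide
        rw [if_neg (by rintro ⟨h, _⟩; exact hflast h), if_pos (by right; right; exact hlast)]
        simp [PySem.List.slice]
    · rw [if_neg (by rintro ⟨_, h⟩; exact hpar h), if_pos (by right; left; omega)]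
      simp [PySem.List.slice]

-- ===== VERDICT (by name: the statement is the Claim_ definition above) =====
theorem codeDiamondInv_spec : Claim_equal_codeDiamondInv := by
  intro s _
  unfold Spec_codeDiamondInv
  exact codeDiamondInv_eq s
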